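-- pv_equiv track=rewrite | github.com/neliCZka/Pyladies | 08_seznamy_ntice/08_homework/08_homework_reseni.py | obrat_sloky
-- ===== SOURCE A (Python) =====
-- def obrat_sloky(pole_radku):
--     indexy_radku = [0]
--     pole_slok = []
--     for i,radek in enumerate(pole_radku):
--         if radek == '':
--             indexy_radku.append(i+1)
--     indexy_radku.append(len(pole_radku)+1)
--     for i in range(len(indexy_radku)-1):
--         od = indexy_radku[i]
--         do = indexy_radku[i+1]-1
--         sloka = pole_radku[od:do]
--         pole_slok.append(sloka)
--     pole_slok.reverse()
--     nove_pole = []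
--     for sloka in pole_slok:
--         for vers in sloka:
--             nove_pole.append(vers)
--         nove_pole.append('')
--     return nove_pole[0:-1]
-- ===== SOURCE B (Python) =====
-- def obrat_sloky(pole_radku):
--     stanzas = []
--     current = []
--     for radek in pole_radku:
--         if radek == '':
--             stanzas.append(current)
--             current = []
--         else:
--             current.append(radek)
--     stanzas.append(current)
--     result = []
--     for i, sloka in enumerate(reversed(stanzas)):
--         if i > 0:
--             result.append('')
--         result.extend(sloka)
--     return result
-- ===== Notes on version B (the rewrite author's own statement) =====
-- stated objective: simpler
-- what changed: A computes blank-line indices in one pass, then cuts the line list into stanzas by index slices in a second pass, reverses, and joins with a trailing separator it finally drops; B builds the stanza list directly in a single accumulation pass over the lines and joins the reversed stanzas with a separator before every stanza but the first, with no index arithmetic and no trailing-separator fixup.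
import Mathlib
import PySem

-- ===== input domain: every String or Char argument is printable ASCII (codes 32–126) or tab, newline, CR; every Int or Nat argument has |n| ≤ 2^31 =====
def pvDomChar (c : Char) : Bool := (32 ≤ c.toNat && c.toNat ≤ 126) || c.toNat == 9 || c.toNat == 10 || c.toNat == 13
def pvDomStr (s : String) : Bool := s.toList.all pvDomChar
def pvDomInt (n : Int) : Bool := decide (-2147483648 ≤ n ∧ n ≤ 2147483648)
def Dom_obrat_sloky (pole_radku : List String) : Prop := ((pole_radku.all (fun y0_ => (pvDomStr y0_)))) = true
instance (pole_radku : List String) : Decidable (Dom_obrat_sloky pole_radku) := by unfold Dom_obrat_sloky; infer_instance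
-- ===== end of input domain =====

-- B replaces A's blank-line-index/slice machinery by a single accumulation pass over the lines (objective: simpler).

-- ===== PORT A =====
def obrat_sloky (pole_radku : List String) : List String :=
  let indexy_radku : List Int :=
    (PySem.List.enumerate pole_radku 0).foldl
      (fun acc p => if p.2 = "" then acc ++ [p.1 + 1] else acc) [0]
  let indexy_radku := indexy_radku ++ [PySem.List.len pole_radku + 1]
  let pole_slok : List (List String) :=
    (PySem.List.pyRange 0 (PySem.List.len indexy_radku - 1) 1).foldl
      (fun acc i =>
        let od := PySem.List.pyGetD indexy_radku i 0
        let d := PySem.List.pyGetD indexy_radku (i + 1) 0 - 1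
        acc ++ [PySem.List.slice pole_radku (some od) (some d)]) []
  let pole_slok := pole_slok.reverse
  let nove_pole : List String :=
    pole_slok.foldl (fun acc sloka =>
      (sloka.foldl (fun acc vers => acc ++ [vers]) acc) ++ [""]) []
  PySem.List.slice nove_pole none (some (-1))

-- ===== PORT B =====
def obrat_sloky_alt (pole_radku : List String) : List String :=
  let p := pole_radku.foldl
    (fun (p : List (List String) × List String) radek =>
      if radek = "" then (p.1 ++ [p.2], ([] : List String)) else (p.1, p.2 ++ [radek]))
    ([], [])
  let stanzas := p.1 ++ [p.2]
  (PySem.List.enumerate stanzas.reverse 0).foldl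
    (fun acc q => (if 0 < q.1 then acc ++ [""] else acc) ++ q.2) []

-- ===== PRECONDITION & SPEC =====
def Spec_obrat_sloky (pole_radku : List String) (out : List String) : Prop := out = obrat_sloky_alt pole_radku
instance (pole_radku : List String) (out : List String) : Decidable (Spec_obrat_sloky pole_radku out) := by unfold Spec_obrat_sloky; infer_instance

-- ===== CLAIM (what is proved, stated in full; the proofs are below) =====
def Claim_equal_obrat_sloky : Prop := ∀ (pole_radku : List String), Dom_obrat_sloky pole_radku → Spec_obrat_sloky pole_radku (obrat_sloky pole_radku)

-- ===== LEMMAS AND PROOFS =====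

/-- positions just after each blank line, lines numbered from `s` -/
def pvBlanks : List String → Nat → List Nat
  | [], _ => []
  | x :: t, s => if x = "" then (s+1) :: pvBlanks t (s+1) else pvBlanks t (s+1)

/-- A's full index list, in Nat -/
def pvIdx (xs : List String) : List Nat := 0 :: (pvBlanks xs 0 ++ [xs.length + 1])

/-- the stanza a consecutive index pair (a,b) cuts out -/
def pvG (xs : List String) (a b : Nat) : List String := (xs.drop a).take (b - 1 - a)

/-- the list of stanzas: split on blank lines (common spec of both programs) -/
def pvSplit : List String → List (List String)
  | [] => [[]]
  | x :: t => if x = "" then [] :: pvSplit t else (pvSplit t).modifyHead (x :: ·)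

/-- join stanzas with a single blank separator -/
def pvJoin : List (List String) → List String
  | [] => []
  | a :: rest => a ++ (rest.map (fun l => "" :: l)).flatten

theorem pvSplit_ne_nil : ∀ (xs : List String), pvSplit xs ≠ []
  | [] => by simp [pvSplit]
  | x :: t => by
    simp only [pvSplit]
    split
    · simp
    · cases h : pvSplit t with
      | nil => exact absurd h (pvSplit_ne_nil t)
      | cons a r => simp [List.modifyHead]

theorem pvBlanks_shift (xs : List String) (s : Nat) :
    pvBlanks xs (s+1) = (pvBlanks xs s).map (· + 1) := by
  induction xs generalizing s with
  | nil => simp [pvBlanks]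
  | cons x t ih => by_cases h : x = "" <;> simp [pvBlanks, h, ih]

theorem pvBlanks_lt (xs : List String) (s : Nat) :
    ∀ m ∈ pvBlanks xs s, s < m := by
  induction xs generalizing s with
  | nil => simp [pvBlanks]
  | cons x t ih =>
    intro m hm
    simp only [pvBlanks] at hm
    split at hm
    · rcases List.mem_cons.1 hm with h | h
      · omega
      · have := ih (s+1) m h; omega
    · have := ih (s+1) m hm; omega

theorem pvTail_pos (xs : List String) :
    ∀ m ∈ pvBlanks xs 0 ++ [xs.length + 1], 1 ≤ m := by
  intro m hm
  rcases List.mem_append.1 hm with h | h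
  · have := pvBlanks_lt xs 0 m h; omega
  · simp at h; omega

/-- A's first loop collects [start] ++ the blank positions. -/
theorem pvEnumFold (xs : List String) (s : Nat) (acc : List Int) :
    (PySem.List.enumerate xs (s : Int)).foldl
      (fun acc p => if p.2 = "" then acc ++ [p.1 + 1] else acc) acc
      = acc ++ (pvBlanks xs s).map Int.ofNat := by
  induction xs generalizing s acc with
  | nil => simp [PySem.List.enumerate_nil, pvBlanks]
  | cons x t ih =>
    rw [PySem.List.enumerate_cons]
    have hc : (s : Int) + 1 = ((s + 1 : Nat) : Int) := by push_cast; ring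
    simp only [List.foldl_cons]
    by_cases h : x = ""
    · rw [if_pos (by simpa using h), hc, ih (s+1) _]
      simp [pvBlanks, h]
    · rw [if_neg (by simpa using h), hc, ih (s+1) _]
      simp [pvBlanks, h]

/-- range/getD formulation of consecutive pairs. -/
theorem pvRangePairs {α : Type} (g : Nat → Nat → α) :
    ∀ (L : List Nat),
    (List.range (L.length - 1)).map (fun k => g (L.getD k 0) (L.getD (k+1) 0))
      = (L.zip L.tail).map (fun p => g p.1 p.2)
  | [] => by simp
  | [a] => by simp
  | a :: b :: r => by
    have ih := pvRangePairs g (b :: r)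
    simp only [List.length_cons, Nat.add_sub_cancel] at ih ⊢
    rw [List.range_succ_eq_map]
    simp only [List.map_cons, List.map_map, List.getD_cons_zero, List.getD_cons_succ,
      List.zip_cons_cons, List.tail_cons, List.map_cons] at ih ⊢
    refine congrArg₂ _ rfl ?_
    rw [← ih]
    apply List.map_congr_left
    intro k _
    simp

/-- cutting with shifted indices on a cons -/
theorem pvG_shift (x : String) (t : List String) (a b : Nat) :
    pvG (x :: t) (a+1) (b+1) = pvG t a b := by
  simp only [pvG, List.drop_succ_cons]
  congr 1
  omega

/-- core: A's slice decomposition is the blank-line split -/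
theorem pvPairs_eq_split (xs : List String) :
    ((pvIdx xs).zip (pvIdx xs).tail).map (fun p => pvG xs p.1 p.2) = pvSplit xs := by
  induction xs with
  | nil => simp [pvIdx, pvBlanks, pvSplit, pvG]
  | cons x t ih =>
    obtain ⟨h, rr, hR⟩ : ∃ h rr, pvBlanks t 0 ++ [t.length + 1] = h :: rr := by
      cases e : pvBlanks t 0 ++ [t.length + 1] with
      | nil => exact absurd e (by simp)
      | cons a l => exact ⟨a, l, rfl⟩
    have hIdx : pvIdx t = 0 :: h :: rr := by simp [pvIdx, hR]
    have h1 : 1 ≤ h := pvTail_pos t h (by rw [hR]; exact List.mem_cons_self ..)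
    have hR1 : (pvBlanks t 0).map (· + 1) ++ [t.length + 1 + 1] = (h + 1) :: rr.map (· + 1) := by
      have := congrArg (List.map (· + 1)) hR
      simpa using this
    have hsplit : pvSplit t = pvG t 0 h :: ((h :: rr).zip rr).map (fun p => pvG t p.1 p.2) := by
      rw [← ih, hIdx]
      simp only [List.tail_cons, List.zip_cons_cons, List.map_cons]
    have htl : (((h + 1) :: rr.map (· + 1)).zip (rr.map (· + 1))).map
        (fun p => pvG (x :: t) p.1 p.2)
        = ((h :: rr).zip rr).map (fun p => pvG t p.1 p.2) := by
      have hc : ((h + 1) :: rr.map (· + 1)) = (h :: rr).map (· + 1) := by simp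
      rw [hc, List.zip_map, List.map_map]
      apply List.map_congr_left
      intro p _
      simpa [Prod.map] using pvG_shift x t p.1 p.2
    have hhead1 : pvG (x :: t) (0 + 1) (h + 1) = pvG t 0 h := pvG_shift x t 0 h
    by_cases hx : x = ""
    · have hmap : pvIdx (x :: t) = 0 :: 1 :: (h + 1) :: rr.map (· + 1) := by
        simp [pvIdx, pvBlanks, hx, pvBlanks_shift t 0, hR1]
      rw [hmap]
      simp only [List.tail_cons, List.zip_cons_cons, List.map_cons]
      rw [htl]
      have hg0 : pvG (x :: t) 0 1 = [] := by simp [pvG]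
      have hg1 : pvG (x :: t) 1 (h + 1) = pvG t 0 h := by simpa using hhead1
      rw [hg0, hg1, pvSplit, if_pos hx, hsplit]
    · have hmap : pvIdx (x :: t) = 0 :: (h + 1) :: rr.map (· + 1) := by
        simp [pvIdx, pvBlanks, hx, pvBlanks_shift t 0, hR1]
      rw [hmap]
      simp only [List.tail_cons, List.zip_cons_cons, List.map_cons]
      rw [htl]
      have hhead : pvG (x :: t) 0 (h + 1) = x :: pvG t 0 h := by
        obtain ⟨k, rfl⟩ : ∃ k, h = k + 1 := ⟨h - 1, by omega⟩
        simp [pvG]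
      rw [hhead, pvSplit, if_neg hx, hsplit]
      simp [List.modifyHead]

/-- A's output loop flattens stanzas each followed by a blank. -/
theorem pvOutFold (L : List (List String)) (acc : List String) :
    L.foldl (fun acc s => (acc ++ s) ++ [""]) acc
      = acc ++ (L.map (· ++ [""])).flatten := by
  induction L generalizing acc with
  | nil => simp
  | cons a r ih => simp [List.append_assoc]

/-- flattening stanzas-each-followed-by-a-blank is the join plus a trailing blank. -/
theorem pvFlattenJoin : ∀ (L : List (List String)), L ≠ [] →
    (L.map (· ++ [""])).flatten = pvJoin L ++ [""]
  | [], hne => absurd rfl hne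
  | [a], _ => by simp [pvJoin]
  | a :: b :: r, _ => by
    have ih := pvFlattenJoin (b :: r) (by simp)
    simp only [List.map_cons, List.flatten_cons] at ih ⊢
    rw [ih]
    simp [pvJoin, List.append_assoc]

/-- B's accumulation loop computes the blank-line split. -/
theorem pvFoldPair (xs : List String) (st : List (List String)) (cur : List String) :
    (xs.foldl (fun (p : List (List String) × List String) radek =>
        if radek = "" then (p.1 ++ [p.2], ([] : List String)) else (p.1, p.2 ++ [radek]))
      (st, cur)).1
    ++ [(xs.foldl (fun (p : List (List String) × List String) radek =>
        if radek = "" then (p.1 ++ [p.2], ([] : List String)) else (p.1, p.2 ++ [radek]))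
      (st, cur)).2]
    = st ++ (pvSplit xs).modifyHead (cur ++ ·) := by
  induction xs generalizing st cur with
  | nil => simp [pvSplit, List.modifyHead]
  | cons x t ih =>
    by_cases h : x = ""
    · simp only [List.foldl_cons, h]
      rw [ih]
      simp only [pvSplit]
      cases hs : pvSplit t with
      | nil => exact absurd hs (pvSplit_ne_nil t)
      | cons a r => simp [List.modifyHead, List.append_assoc]
    · simp only [List.foldl_cons, if_neg h]
      rw [ih]
      simp only [pvSplit, if_neg h]
      congr 1
      cases hs : pvSplit t with
      | nil => exact absurd hs (pvSplit_ne_nil t)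
      | cons a r => simp [List.modifyHead]

/-- B's output loop past the first stanza always prepends a separator. -/
theorem pvEnumJoin (rest : List (List String)) (s : Nat) (acc : List String) (hs : 1 ≤ s) :
    (PySem.List.enumerate rest (s : Int)).foldl
      (fun acc q => (if 0 < q.1 then acc ++ [""] else acc) ++ q.2) acc
    = acc ++ (rest.map (fun l => "" :: l)).flatten := by
  induction rest generalizing s acc with
  | nil => simp [PySem.List.enumerate_nil]
  | cons a r ih =>
    rw [PySem.List.enumerate_cons]
    have hc : (s : Int) + 1 = ((s + 1 : Nat) : Int) := by push_cast; ring
    simp only [List.foldl_cons]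
    rw [if_pos (by exact_mod_cast Nat.lt_of_lt_of_le Nat.zero_lt_one hs), hc,
      ih (s+1) _ (by omega)]
    simp [List.append_assoc]

/-- A computes the blank-separated join of the reversed stanzas. -/
theorem pvA_eq (xs : List String) : obrat_sloky xs = pvJoin ((pvSplit xs).reverse) := by
  unfold obrat_sloky
  simp only []
  have hef := pvEnumFold xs 0 ([0] : List Int)
  simp only [Nat.cast_zero] at hef
  rw [hef]
  -- the index list is (pvIdx xs).map cast
  have hidx : ([(0 : Int)] ++ (pvBlanks xs 0).map Int.ofNat)
      ++ [PySem.List.len xs + 1] = (pvIdx xs).map Int.ofNat := by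
    simp [pvIdx, PySem.List.len_eq]
  rw [hidx]
  -- second loop: map over range of the pair slices
  rw [PySem.List.foldl_append_singleton_eq_map]
  have hlen : (PySem.List.len ((pvIdx xs).map Int.ofNat) - 1)
      = (((pvIdx xs).length - 1 : Nat) : Int) := by
    simp [PySem.List.len_eq, pvIdx]
  rw [hlen]
  rw [PySem.List.pyRange_one]
  have hto : ((((pvIdx xs).length - 1 : Nat) : Int) - 0).toNat = (pvIdx xs).length - 1 := by
    omega
  rw [hto, List.map_map]
  have hmapeq : (List.range ((pvIdx xs).length - 1)).map
      ((fun i =>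
        PySem.List.slice xs (some (PySem.List.pyGetD ((pvIdx xs).map Int.ofNat) i 0))
          (some (PySem.List.pyGetD ((pvIdx xs).map Int.ofNat) (i + 1) 0 - 1)))
        ∘ (fun k : Nat => (0 : Int) + k))
      = (List.range ((pvIdx xs).length - 1)).map
        (fun k => pvG xs ((pvIdx xs).getD k 0) ((pvIdx xs).getD (k+1) 0)) := by
    apply List.map_congr_left
    intro k hk
    simp only [Function.comp, zero_add]
    have hk' : k < (pvIdx xs).length - 1 := List.mem_range.1 hk
    have e1 : PySem.List.pyGetD ((pvIdx xs).map Int.ofNat) (k : Int) 0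
        = ((pvIdx xs).getD k 0 : Int) := by
      rw [PySem.List.pyGetD_natCast, show (0:Int) = Int.ofNat 0 from rfl, List.getD_map]
      simp
    have e2 : PySem.List.pyGetD ((pvIdx xs).map Int.ofNat) ((k : Int) + 1) 0
        = ((pvIdx xs).getD (k+1) 0 : Int) := by
      have : (k : Int) + 1 = ((k + 1 : Nat) : Int) := by push_cast; ring
      rw [this, PySem.List.pyGetD_natCast, show (0:Int) = Int.ofNat 0 from rfl, List.getD_map]
      simp
    rw [e1, e2]
    -- the second index is an element of the tail, hence ≥ 1
    set b := (pvIdx xs).getD (k+1) 0 with hb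
    have hb1 : 1 ≤ b := by
      have hlt : k + 1 < (pvIdx xs).length := by omega
      have : (pvIdx xs).getD (k+1) 0 = (pvIdx xs)[k+1]'hlt := List.getD_eq_getElem _ _ hlt
      rw [hb, this]
      have hmem : (pvIdx xs)[k+1]'hlt ∈ (pvIdx xs).tail := by
        have : (pvIdx xs)[k+1]'hlt = (pvIdx xs).tail[k]'(by simp [pvIdx] at hlt ⊢; omega) := by
          simp [pvIdx]
        rw [this]
        exact List.getElem_mem _
      exact pvTail_pos xs _ (by simp only [pvIdx, List.tail_cons] at hmem; exact hmem)
    have e3 : ((b : Int) - 1) = ((b - 1 : Nat) : Int) := by omega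
    rw [e3, PySem.List.slice_natCast]
    simp [pvG]
  rw [hmapeq, pvRangePairs (pvG xs) (pvIdx xs), pvPairs_eq_split xs]
  -- output loop
  have hinner : ∀ (acc sloka : List String),
      sloka.foldl (fun acc vers => acc ++ [vers]) acc = acc ++ sloka :=
    fun acc sloka => PySem.List.foldl_append_singleton_eq_self sloka acc
  simp only [hinner]
  rw [pvOutFold, PySem.List.slice_to_neg_one]
  simp only [List.nil_append]
  rw [pvFlattenJoin _ (by simp [pvSplit_ne_nil xs])]
  simp

/-- B computes the blank-separated join of the reversed stanzas. -/
theorem pvB_eq (xs : List String) : obrat_sloky_alt xs = pvJoin ((pvSplit xs).reverse) := by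
  unfold obrat_sloky_alt
  simp only []
  have hstanzas :
      (xs.foldl (fun (p : List (List String) × List String) radek =>
          if radek = "" then (p.1 ++ [p.2], ([] : List String)) else (p.1, p.2 ++ [radek]))
        ([], [])).1
      ++ [(xs.foldl (fun (p : List (List String) × List String) radek =>
          if radek = "" then (p.1 ++ [p.2], ([] : List String)) else (p.1, p.2 ++ [radek]))
        ([], [])).2] = pvSplit xs := by
    rw [pvFoldPair xs [] []]
    cases h : pvSplit xs <;> simp [List.modifyHead]
  rw [hstanzas]
  cases hr : (pvSplit xs).reverse with
  | nil => exact absurd (by simpa using congrArg List.reverse hr) (by simpa using pvSplit_ne_nil xs)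
  | cons a rest =>
    rw [PySem.List.enumerate_cons]
    simp only [List.foldl_cons, if_neg (by norm_num : ¬ (0:Int) < 0)]
    have e1 : (0 : Int) + 1 = ((1 : Nat) : Int) := by norm_num
    rw [e1, pvEnumJoin rest 1 _ le_rfl]
    simp [pvJoin]

-- ===== VERDICT (by name: the statement is the Claim_ definition above) =====
theorem obrat_sloky_spec : Claim_equal_obrat_sloky := by
  intro xs _
  unfold Spec_obrat_sloky
  rw [pvA_eq, pvB_eq]
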